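-- pv_equiv track=rewrite | github.com/zain-raza-16/Wild_python | TextJustification.py | find_spacing_between_words
-- ===== SOURCE A (Python) =====
-- def find_spacing_between_words(total_elements, extra_space):
--     respective_extra_space = [0] * (total_elements - 1)
--     while extra_space != 0:
--         for i in range(total_elements - 1):
--             if extra_space == 0:
--                 break
--             else:
--                 respective_extra_space[i] += 1
--                 extra_space -= 1
--     return respective_extra_space
-- ===== SOURCE B (Python) =====
-- def find_spacing_between_words(total_elements, extra_space):
--     slots = total_elements - 1
--     if slots <= 0:
--         return []
--     q, r = divmod(extra_space, slots)
--     return [q + 1] * r + [q] * (slots - r)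
-- ===== Notes on version B (the rewrite author's own statement) =====
-- stated objective: faster
-- what changed: Replaces the round-robin while/for loop that hands out one space at a time with the closed-form divmod distribution: quotient to every gap, one extra to the first remainder gaps.
import Mathlib
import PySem

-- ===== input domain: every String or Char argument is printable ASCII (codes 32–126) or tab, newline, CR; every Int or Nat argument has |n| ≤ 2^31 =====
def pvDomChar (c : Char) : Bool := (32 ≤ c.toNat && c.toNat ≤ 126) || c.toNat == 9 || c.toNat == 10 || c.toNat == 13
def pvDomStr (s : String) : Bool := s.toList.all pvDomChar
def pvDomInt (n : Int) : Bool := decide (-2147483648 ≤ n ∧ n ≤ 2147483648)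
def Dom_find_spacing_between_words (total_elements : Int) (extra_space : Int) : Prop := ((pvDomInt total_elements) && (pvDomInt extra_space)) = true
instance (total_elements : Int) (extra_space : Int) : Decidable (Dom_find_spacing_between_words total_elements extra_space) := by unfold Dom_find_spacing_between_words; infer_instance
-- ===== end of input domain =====

-- B replaces A's one-space-at-a-time round-robin loop with the closed-form divmod
-- distribution (quotient everywhere, +1 on the first remainder gaps): asymptotically faster.

-- ===== PORT A =====
-- the inner `for i in range(total_elements - 1)` body: increment arr[i], decrement es, break when es = 0
def fsPass (arr : List Int) (es : Int) (idxs : List Nat) : List Int × Int :=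
  match idxs with
  | [] => (arr, es)
  | i :: rest =>
      if es = 0 then (arr, es)
      else fsPass (arr.set i (arr.getD i 0 + 1)) (es - 1) rest

-- the outer `while extra_space != 0` loop; the fuel only makes the recursion total in Lean:
-- inside Pre_ each pass strictly decreases es, so the fuel es.toNat + 1 is never exhausted
def fsWhile (fuel : Nat) (idxs : List Nat) (arr : List Int) (es : Int) : List Int :=
  match fuel with
  | 0 => arr
  | fuel + 1 =>
      if es = 0 then arr
      else
        let p := fsPass arr es idxs
        fsWhile fuel idxs p.1 p.2

def find_spacing_between_words (total_elements : Int) (extra_space : Int) : List Int :=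
  fsWhile (extra_space.toNat + 1) (List.range (total_elements - 1).toNat)
    (List.replicate (total_elements - 1).toNat 0) extra_space

-- ===== PORT B =====
def find_spacing_between_words_alt (total_elements : Int) (extra_space : Int) : List Int :=
  let slots := total_elements - 1
  if slots ≤ 0 then []
  else
    let q := PySem.Int.floordiv extra_space slots
    let r := PySem.Int.mod extra_space slots
    List.replicate r.toNat (q + 1) ++ List.replicate (slots - r).toNat q

-- ===== PRECONDITION & SPEC =====
-- Pre_ excludes exactly the inputs on which A never returns (it loops forever):
-- extra_space < 0, or extra_space > 0 with fewer than two elements (no gap to put a space in).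
def Pre_find_spacing_between_words (total_elements : Int) (extra_space : Int) : Prop :=
  0 ≤ extra_space ∧ (extra_space = 0 ∨ 2 ≤ total_elements)
instance (total_elements : Int) (extra_space : Int) : Decidable (Pre_find_spacing_between_words total_elements extra_space) := by unfold Pre_find_spacing_between_words; infer_instance

def pvWitness_find_spacing_between_words : Int × Int := (4, 7)

def Spec_find_spacing_between_words (total_elements : Int) (extra_space : Int) (out : List Int) : Prop := out = find_spacing_between_words_alt total_elements extra_space
instance (total_elements : Int) (extra_space : Int) (out : List Int) : Decidable (Spec_find_spacing_between_words total_elements extra_space out) := by unfold Spec_find_spacing_between_words; infer_instance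

-- ===== CLAIM (what is proved, stated in full; the proofs are below) =====
def Claim_equal_find_spacing_between_words : Prop := ∀ (total_elements : Int) (extra_space : Int), Dom_find_spacing_between_words total_elements extra_space → Pre_find_spacing_between_words total_elements extra_space → Spec_find_spacing_between_words total_elements extra_space (find_spacing_between_words total_elements extra_space)

-- ===== LEMMAS AND PROOFS =====

-- one pass over range' s m, starting from a prefix of s incremented entries, with s + m = k
lemma fsPass_eq (j : Int) (k : Nat) :
    ∀ (m s : Nat), s + m = k → ∀ es : Int, 0 ≤ es →
      fsPass (List.replicate s (j + 1) ++ List.replicate (k - s) j) es (List.range' s m) =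
        if es ≤ (m : Int) then
          (List.replicate (s + es.toNat) (j + 1) ++ List.replicate (k - (s + es.toNat)) j, 0)
        else (List.replicate k (j + 1), es - m) := by
  intro m
  induction m with
  | zero =>
      intro s hs es hes
      by_cases h : es = 0
      · subst h
        rw [if_pos (by omega)]
        simp [fsPass]
      · rw [if_neg (by omega)]
        have hsk : s = k := by omega
        subst hsk
        simp [fsPass]
  | succ m ih =>
      intro s hs es hes
      rw [List.range'_succ]
      by_cases h0 : es = 0
      · subst h0
        rw [if_pos (by push_cast; omega)]
        simp [fsPass]
      · have hslt : s < k := by omega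
        have hget : (List.replicate s (j + 1) ++ List.replicate (k - s) j).getD s 0 = j := by
          rw [List.getD_eq_getElem _ _ (by simp; omega)]
          rw [List.getElem_append_right (by simp)]
          simp
        have hset : (List.replicate s (j + 1) ++ List.replicate (k - s) j).set s (j + 1) =
            List.replicate (s + 1) (j + 1) ++ List.replicate (k - (s + 1)) j := by
          have hk : k - s = (k - (s + 1)) + 1 := by omega
          rw [List.set_append]
          simp only [List.length_replicate, lt_irrefl, if_false, Nat.sub_self]
          rw [hk, List.replicate_succ, List.set_cons_zero,
            List.replicate_succ' (n := s), List.append_assoc]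
          simp
        simp only [fsPass, h0, if_false, hget, hset]
        rw [ih (s + 1) (by omega) (es - 1) (by omega)]
        by_cases hle : es ≤ ((m : Int) + 1)
        · rw [if_pos (by omega), if_pos (by push_cast; omega)]
          have h2 : (s + 1) + (es - 1).toNat = s + es.toNat := by omega
          rw [h2]
        · rw [if_neg (by omega), if_neg (by push_cast; omega)]
          simp only [Prod.mk.injEq, true_and]
          push_cast; ring

-- once the budget is exhausted the while loop returns its array, whatever fuel remains
lemma fsWhile_zero (fuel : Nat) (idxs : List Nat) (arr : List Int) :
    fsWhile fuel idxs arr 0 = arr := by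
  cases fuel <;> simp [fsWhile]

-- the while loop from a uniform array replicate k j distributes es round-robin
lemma fsWhile_eq (k : Nat) (hk : 1 ≤ k) :
    ∀ (fuel : Nat) (es : Int) (j : Int), 0 ≤ es → es.toNat < fuel →
      fsWhile fuel (List.range k) (List.replicate k j) es =
        List.replicate (es.toNat % k) (j + (es.toNat / k : Nat) + 1) ++
          List.replicate (k - es.toNat % k) (j + (es.toNat / k : Nat)) := by
  intro fuel
  induction fuel with
  | zero => intro es j _ h; omega
  | succ fuel ih =>
      intro es j hes hfuel
      by_cases h0 : es = 0
      · subst h0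
        simp [fsWhile, Nat.mod_eq_of_lt hk]
      · simp only [fsWhile, h0, if_false]
        have hrange : List.range k = List.range' 0 k := by
          simp [List.range_eq_range']
        have hpass := fsPass_eq j k k 0 (by omega) es hes
        simp only [Nat.zero_add, Nat.sub_zero, List.replicate_zero, List.nil_append] at hpass
        rw [hrange, hpass, ← hrange]
        by_cases hle : es ≤ (k : Int)
        · rw [if_pos hle]
          rcases Nat.lt_or_ge es.toNat k with hlt' | hge
          · have hmod : es.toNat % k = es.toNat := Nat.mod_eq_of_lt hlt'
            have hdiv : es.toNat / k = 0 := Nat.div_eq_of_lt hlt'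
            rw [fsWhile_zero, hmod, hdiv]
            simp
          · have heq : es.toNat = k := by omega
            have hmod : es.toNat % k = 0 := by rw [heq]; exact Nat.mod_self k
            have hdiv : es.toNat / k = 1 := by rw [heq]; exact Nat.div_self hk
            rw [fsWhile_zero, hmod, hdiv, heq]
            simp
        · rw [if_neg hle]
          have hes' : (0 : Int) ≤ es - k := by omega
          have hfuel' : (es - (k : Int)).toNat < fuel := by omega
          rw [ih (es - (k : Int)) (j + 1) hes' hfuel']
          have htn : (es - (k : Int)).toNat = es.toNat - k := by omega
          have hkle : k ≤ es.toNat := by omega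
          have hmod : (es.toNat - k) % k = es.toNat % k := by
            conv_rhs => rw [← Nat.sub_add_cancel hkle]
            rw [Nat.add_mod_right]
          have hdiv : (es.toNat - k) / k + 1 = es.toNat / k := by
            conv_rhs => rw [← Nat.sub_add_cancel hkle]
            rw [Nat.add_div_right _ hk]
          rw [htn, hmod]
          have hj1 : j + 1 + ((es.toNat - k) / k : Nat) + 1 = j + (es.toNat / k : Nat) + 1 := by
            rw [← hdiv]; push_cast; ring
          have hj2 : j + 1 + ((es.toNat - k) / k : Nat) = j + (es.toNat / k : Nat) := by
            rw [← hdiv]; push_cast; ring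
          rw [hj1, hj2]

-- floordiv/mod with a nonnegative dividend and positive divisor are Nat div/mod on toNat
lemma floordiv_nonneg_pos (a b : Int) (ha : 0 ≤ a) (hb : 0 < b) :
    PySem.Int.floordiv a b = ((a.toNat / b.toNat : Nat) : Int) := by
  rw [← Int.toNat_of_nonneg ha, ← Int.toNat_of_nonneg hb.le, PySem.Int.floordiv_natCast]
  simp
lemma mod_nonneg_pos (a b : Int) (ha : 0 ≤ a) (hb : 0 < b) :
    PySem.Int.mod a b = ((a.toNat % b.toNat : Nat) : Int) := by
  rw [← Int.toNat_of_nonneg ha, ← Int.toNat_of_nonneg hb.le, PySem.Int.mod_natCast]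
  simp

-- ===== VERDICT (by name: the statement is the Claim_ definition above) =====
theorem find_spacing_between_words_spec : Claim_equal_find_spacing_between_words := by
  intro n es _ hpre
  obtain ⟨hes, hcase⟩ := hpre
  unfold Spec_find_spacing_between_words find_spacing_between_words find_spacing_between_words_alt
  by_cases hslots : n - 1 ≤ 0
  · -- no gaps: Pre_ forces es = 0, both sides are []
    have h0 : es = 0 := by
      rcases hcase with h | h
      · exact h
      · omega
    subst h0
    have : (n - 1).toNat = 0 := by omega
    simp [fsWhile, this, hslots]
  · have hk1 : 1 ≤ (n - 1).toNat := by omega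
    have hmain := fsWhile_eq (n - 1).toNat hk1 (es.toNat + 1) es 0 hes (by omega)
    rw [hmain]
    simp only [hslots, if_false]
    rw [floordiv_nonneg_pos es (n - 1) hes (by omega),
        mod_nonneg_pos es (n - 1) hes (by omega)]
    have h1 : ((es.toNat % (n - 1).toNat : Nat) : Int).toNat = es.toNat % (n - 1).toNat := by omega
    have h2 : (n - 1 - ((es.toNat % (n - 1).toNat : Nat) : Int)).toNat
        = (n - 1).toNat - es.toNat % (n - 1).toNat := by
      have := Nat.mod_lt es.toNat (show 0 < (n-1).toNat by omega)
      omega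
    rw [h1, h2]
    simp
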